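-- pv_equiv track=rewrite | github.com/youngwoo2020/Rerec | 3.data_preprocess.py | filter_minimum
-- ===== SOURCE A (Python) =====
-- def filter_minimum(user_items, user_ratings, user_titles,
--                    user_reviews, user_times, user_parents,
--                    user_verified, user_helpful,
--                    min_len=3):
--
--     new_items = {}
--     new_ratings = {}
--     new_titles = {}
--     new_reviews = {}
--     new_times = {}
--     new_parents = {}
--     new_verified = {}
--     new_helpful = {}
--
--     for user, items in user_items.items():
--         if len(items) >= min_len:
--             new_items[user] = items
--             new_ratings[user] = user_ratings[user]
--             new_titles[user] = user_titles[user]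
--             new_reviews[user] = user_reviews[user]
--             new_times[user] = user_times[user]
--             new_parents[user] = user_parents[user]
--             new_verified[user] = user_verified[user]
--             new_helpful[user] = user_helpful[user]
--
--     return (new_items, new_ratings, new_titles,
--             new_reviews, new_times, new_parents,
--             new_verified, new_helpful)
-- ===== SOURCE B (Python) =====
-- def filter_minimum(user_items, user_ratings, user_titles,
--                    user_reviews, user_times, user_parents,
--                    user_verified, user_helpful,
--                    min_len=3):
--     # Phase 1: materialize one ROW per qualifying user -- a join of all eight
--     # tables into a single row-table (array-of-structs).
--     rows = []
--     for user, items in user_items.items():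
--         if len(items) >= min_len:
--             rows.append((user, items,
--                          user_ratings[user], user_titles[user],
--                          user_reviews[user], user_times[user],
--                          user_parents[user], user_verified[user],
--                          user_helpful[user]))
--     # Phase 2: transpose the row-table into eight column dicts
--     # (struct-of-arrays), one generic pass per column index.
--     return tuple(dict((row[0], row[col]) for row in rows)
--                  for col in range(1, 9))
-- ===== Notes on version B (the rewrite author's own statement) =====
-- stated objective: alternative
-- what changed: Instead of A's fused loop that populates eight dicts in parallel, B materializes a single row-table (one joined 9-tuple per qualifying user) and then transposes it, building each output dict from one column of the table.
import Mathlib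
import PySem

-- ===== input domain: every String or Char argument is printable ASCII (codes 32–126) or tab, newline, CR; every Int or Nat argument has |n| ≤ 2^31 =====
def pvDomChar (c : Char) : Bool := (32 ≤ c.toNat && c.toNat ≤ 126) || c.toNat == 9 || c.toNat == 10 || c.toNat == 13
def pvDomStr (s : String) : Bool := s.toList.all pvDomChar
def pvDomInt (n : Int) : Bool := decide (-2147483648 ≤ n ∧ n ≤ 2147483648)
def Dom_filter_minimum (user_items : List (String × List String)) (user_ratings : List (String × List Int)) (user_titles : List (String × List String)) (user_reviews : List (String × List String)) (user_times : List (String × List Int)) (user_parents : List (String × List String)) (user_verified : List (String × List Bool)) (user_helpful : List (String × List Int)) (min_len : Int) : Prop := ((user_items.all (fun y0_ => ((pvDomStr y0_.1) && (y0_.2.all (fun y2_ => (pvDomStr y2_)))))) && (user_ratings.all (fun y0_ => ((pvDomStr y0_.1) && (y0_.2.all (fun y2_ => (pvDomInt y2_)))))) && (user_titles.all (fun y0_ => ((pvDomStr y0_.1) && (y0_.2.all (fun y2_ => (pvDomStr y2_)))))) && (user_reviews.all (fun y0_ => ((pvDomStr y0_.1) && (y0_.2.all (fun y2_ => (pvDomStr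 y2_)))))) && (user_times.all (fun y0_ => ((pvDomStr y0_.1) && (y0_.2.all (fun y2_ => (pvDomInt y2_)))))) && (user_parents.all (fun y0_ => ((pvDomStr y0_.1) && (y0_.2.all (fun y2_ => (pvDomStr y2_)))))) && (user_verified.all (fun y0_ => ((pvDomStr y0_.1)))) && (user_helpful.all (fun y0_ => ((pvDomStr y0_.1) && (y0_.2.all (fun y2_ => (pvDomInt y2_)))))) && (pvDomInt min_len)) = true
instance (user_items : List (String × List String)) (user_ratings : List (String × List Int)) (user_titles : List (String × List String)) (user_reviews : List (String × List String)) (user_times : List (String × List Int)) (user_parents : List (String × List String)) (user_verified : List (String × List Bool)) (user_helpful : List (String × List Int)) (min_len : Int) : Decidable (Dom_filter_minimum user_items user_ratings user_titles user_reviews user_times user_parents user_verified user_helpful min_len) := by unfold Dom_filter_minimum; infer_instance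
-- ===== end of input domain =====

-- ===== PORT A =====
-- B replaces A's fused eight-dict-populating loop by a materialized row-table (one joined row per
-- qualifying user) followed by a per-column transpose into the eight dicts; objective: alternative.
-- fmGet d k = Python's d[k] on a dict given as an association list (first match); `none` would be a
-- KeyError, which Pre_filter_minimum excludes, so the [] default is never taken inside Pre_.
def fmGet {b : Type} (d : List (String × List b)) (k : String) : List b :=
  (List.lookup k d).getD []

-- the 8-tuple of fresh dicts A's loop fills
abbrev FMSt : Type :=
  PySem.Dict String (List String) × PySem.Dict String (List Int) ×
  PySem.Dict String (List String) × PySem.Dict String (List String) ×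
  PySem.Dict String (List Int) × PySem.Dict String (List String) ×
  PySem.Dict String (List Bool) × PySem.Dict String (List Int)

def filter_minimum (user_items : List (String × List String)) (user_ratings : List (String × List Int)) (user_titles : List (String × List String)) (user_reviews : List (String × List String)) (user_times : List (String × List Int)) (user_parents : List (String × List String)) (user_verified : List (String × List Bool)) (user_helpful : List (String × List Int)) (min_len : Int) : (List (String × List String)) × (List (String × List Int)) × (List (String × List String)) × (List (String × List String)) × (List (String × List Int)) × (List (String × List String)) × (List (String × List Bool)) × (List (String × List Int)) :=
  let fin : FMSt := user_items.foldl
    (fun st e =>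
      if min_len ≤ (e.2.length : Int) then
        (st.1.insert e.1 e.2,
         st.2.1.insert e.1 (fmGet user_ratings e.1),
         st.2.2.1.insert e.1 (fmGet user_titles e.1),
         st.2.2.2.1.insert e.1 (fmGet user_reviews e.1),
         st.2.2.2.2.1.insert e.1 (fmGet user_times e.1),
         st.2.2.2.2.2.1.insert e.1 (fmGet user_parents e.1),
         st.2.2.2.2.2.2.1.insert e.1 (fmGet user_verified e.1),
         st.2.2.2.2.2.2.2.insert e.1 (fmGet user_helpful e.1))
      else st)
    (PySem.Dict.empty, PySem.Dict.empty, PySem.Dict.empty, PySem.Dict.empty,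
     PySem.Dict.empty, PySem.Dict.empty, PySem.Dict.empty, PySem.Dict.empty)
  (fin.1.items, fin.2.1.items, fin.2.2.1.items, fin.2.2.2.1.items,
   fin.2.2.2.2.1.items, fin.2.2.2.2.2.1.items, fin.2.2.2.2.2.2.1.items, fin.2.2.2.2.2.2.2.items)

-- ===== PORT B =====
-- one joined row of Source B's row-table: (user, items, ratings, titles, reviews, times, parents, verified, helpful)
abbrev FMRow : Type :=
  String × List String × List Int × List String × List String ×
  List Int × List String × List Bool × List Int

-- Python's dict(pairs) returned as an association list (insertion order, later duplicates overwrite)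
def fmDict {b : Type} (pairs : List (String × b)) : List (String × b) :=
  (pairs.foldl (fun d p => d.insert p.1 p.2) PySem.Dict.empty).items

def filter_minimum_alt (user_items : List (String × List String)) (user_ratings : List (String × List Int)) (user_titles : List (String × List String)) (user_reviews : List (String × List String)) (user_times : List (String × List Int)) (user_parents : List (String × List String)) (user_verified : List (String × List Bool)) (user_helpful : List (String × List Int)) (min_len : Int) : (List (String × List String)) × (List (String × List Int)) × (List (String × List String)) × (List (String × List String)) × (List (String × List Int)) × (List (String × List String)) × (List (String × List Bool)) × (List (String × List Int)) :=
  -- Phase 1: the row-table (Source B's `rows`)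
  let rows : List FMRow := user_items.foldl
    (fun acc e =>
      if min_len ≤ (e.2.length : Int) then
        acc ++ [(e.1, e.2, fmGet user_ratings e.1, fmGet user_titles e.1,
                 fmGet user_reviews e.1, fmGet user_times e.1,
                 fmGet user_parents e.1, fmGet user_verified e.1, fmGet user_helpful e.1)]
      else acc) []
  -- Phase 2: Source B's `for col in range(1, 9)` transpose, unrolled here because the row tuple is
  -- heterogeneous in Lean; each line is exactly `dict((row[0], row[col]) for row in rows)`.
  (fmDict (rows.map (fun r => (r.1, r.2.1))),
   fmDict (rows.map (fun r => (r.1, r.2.2.1))),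
   fmDict (rows.map (fun r => (r.1, r.2.2.2.1))),
   fmDict (rows.map (fun r => (r.1, r.2.2.2.2.1))),
   fmDict (rows.map (fun r => (r.1, r.2.2.2.2.2.1))),
   fmDict (rows.map (fun r => (r.1, r.2.2.2.2.2.2.1))),
   fmDict (rows.map (fun r => (r.1, r.2.2.2.2.2.2.2.1))),
   fmDict (rows.map (fun r => (r.1, r.2.2.2.2.2.2.2.2))))

-- ===== PRECONDITION & SPEC =====
-- Pre_ excludes (a) inputs where a qualifying user of user_items is missing from one of the seven other
-- dicts, on which A raises KeyError, and (b) duplicate keys in user_items, which no Python dict argument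
-- can have (the association list would not represent any dict).
def Pre_filter_minimum (user_items : List (String × List String)) (user_ratings : List (String × List Int)) (user_titles : List (String × List String)) (user_reviews : List (String × List String)) (user_times : List (String × List Int)) (user_parents : List (String × List String)) (user_verified : List (String × List Bool)) (user_helpful : List (String × List Int)) (min_len : Int) : Prop :=
  (user_items.map Prod.fst).Nodup ∧
  ∀ e ∈ user_items, min_len ≤ (e.2.length : Int) →
    (List.lookup e.1 user_ratings).isSome ∧ (List.lookup e.1 user_titles).isSome ∧
    (List.lookup e.1 user_reviews).isSome ∧ (List.lookup e.1 user_times).isSome ∧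
    (List.lookup e.1 user_parents).isSome ∧ (List.lookup e.1 user_verified).isSome ∧
    (List.lookup e.1 user_helpful).isSome

instance (user_items : List (String × List String)) (user_ratings : List (String × List Int)) (user_titles : List (String × List String)) (user_reviews : List (String × List String)) (user_times : List (String × List Int)) (user_parents : List (String × List String)) (user_verified : List (String × List Bool)) (user_helpful : List (String × List Int)) (min_len : Int) : Decidable (Pre_filter_minimum user_items user_ratings user_titles user_reviews user_times user_parents user_verified user_helpful min_len) := by unfold Pre_filter_minimum; infer_instance

def pvWitness_filter_minimum : (List (String × List String)) × (List (String × List Int)) × (List (String × List String)) × (List (String × List String)) × (List (String × List Int)) × (List (String × List String)) × (List (String × List Bool)) × (List (String × List Int)) × Int :=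
  ([("u", ["a", "b", "c"]), ("v", ["a"])], [("u", [5]), ("v", [])], [("u", ["t"]), ("v", [])],
   [("u", ["r"]), ("v", [])], [("u", [7]), ("v", [])], [("u", ["p"]), ("v", [])],
   [("u", [true]), ("v", [])], [("u", [0]), ("v", [])], 3)

def Spec_filter_minimum (user_items : List (String × List String)) (user_ratings : List (String × List Int)) (user_titles : List (String × List String)) (user_reviews : List (String × List String)) (user_times : List (String × List Int)) (user_parents : List (String × List String)) (user_verified : List (String × List Bool)) (user_helpful : List (String × List Int)) (min_len : Int) (out : (List (String × List String)) × (List (String × List Int)) × (List (String × List String)) × (List (String × List String)) × (List (String × List Int)) × (List (String × List String)) × (List (String × List Bool)) × (List (String × List Int))) : Prop := out = filter_minimum_alt user_items user_ratings user_titles user_reviews user_times user_parents user_verified user_helpful min_len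

instance (user_items : List (String × List String)) (user_ratings : List (String × List Int)) (user_titles : List (String × List String)) (user_reviews : List (String × List String)) (user_times : List (String × List Int)) (user_parents : List (String × List String)) (user_verified : List (String × List Bool)) (user_helpful : List (String × List Int)) (min_len : Int) (out : (List (String × List String)) × (List (String × List Int)) × (List (String × List String)) × (List (String × List String)) × (List (String × List Int)) × (List (String × List String)) × (List (String × List Bool)) × (List (String × List Int))) : Decidable (Spec_filter_minimum user_items user_ratings user_titles user_reviews user_times user_parents user_verified user_helpful min_len out) := by
  unfold Spec_filter_minimum
  exact @instDecidableEqProd _ _ _ (@instDecidableEqProd _ _ _ (@instDecidableEqProd _ _ _ (@instDecidableEqProd _ _ _ (@instDecidableEqProd _ _ _ (@instDecidableEqProd _ _ _ (@instDecidableEqProd _ _ _ instDecidableEqList)))))) out (filter_minimum_alt user_items user_ratings user_titles user_reviews user_times user_parents user_verified user_helpful min_len)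

-- ===== CLAIM (what is proved, stated in full; the proofs are below) =====
def Claim_equal_filter_minimum : Prop := ∀ (user_items : List (String × List String)) (user_ratings : List (String × List Int)) (user_titles : List (String × List String)) (user_reviews : List (String × List String)) (user_times : List (String × List Int)) (user_parents : List (String × List String)) (user_verified : List (String × List Bool)) (user_helpful : List (String × List Int)) (min_len : Int), Dom_filter_minimum user_items user_ratings user_titles user_reviews user_times user_parents user_verified user_helpful min_len → Pre_filter_minimum user_items user_ratings user_titles user_reviews user_times user_parents user_verified user_helpful min_len → Spec_filter_minimum user_items user_ratings user_titles user_reviews user_times user_parents user_verified user_helpful min_len (filter_minimum user_items user_ratings user_titles user_reviews user_times user_parents user_verified user_helpful min_len)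

-- ===== LEMMAS AND PROOFS =====
-- one dict of B's transpose phase: dict((row[0], row[col]) for row in rows) over fresh distinct keys
theorem fmDict_map_eq {b c : Type} (rows : List (String × c)) (g : String × c → List b)
    (hnd : (rows.map Prod.fst).Nodup) :
    fmDict (rows.map (fun r => (r.1, g r))) = rows.map (fun r => (r.1, g r)) := by
  unfold fmDict
  rw [PySem.Dict.items_foldl_insert_fresh (rows.map (fun r => (r.1, g r))) Prod.fst Prod.snd
        PySem.Dict.empty (fun a _ => PySem.Dict.contains_empty a.1)
        (by simpa [List.map_map, Function.comp_def] using hnd)]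
  simp [PySem.Dict.empty]

-- ===== VERDICT (by name: the statement is the Claim_ definition above) =====
theorem filter_minimum_spec : Claim_equal_filter_minimum := by
  intro ui ur ut urv utm up uv uh ml _ hpre
  obtain ⟨hnd, -⟩ := hpre
  unfold Spec_filter_minimum filter_minimum filter_minimum_alt
  dsimp only
  rw [PySem.List.foldl_ite_eq_foldl_filter
        (p := fun e : String × List String => ml ≤ (e.2.length : Int))
        (f := fun (st : FMSt) (e : String × List String) =>
          (st.1.insert e.1 e.2,
           st.2.1.insert e.1 (fmGet ur e.1),
           st.2.2.1.insert e.1 (fmGet ut e.1),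
           st.2.2.2.1.insert e.1 (fmGet urv e.1),
           st.2.2.2.2.1.insert e.1 (fmGet utm e.1),
           st.2.2.2.2.2.1.insert e.1 (fmGet up e.1),
           st.2.2.2.2.2.2.1.insert e.1 (fmGet uv e.1),
           st.2.2.2.2.2.2.2.insert e.1 (fmGet uh e.1)))]
  rw [PySem.List.foldl_ite_eq_foldl_filter
        (p := fun e : String × List String => ml ≤ (e.2.length : Int))
        (f := fun (acc : List FMRow) (e : String × List String) =>
          acc ++ [(e.1, e.2, fmGet ur e.1, fmGet ut e.1, fmGet urv e.1,
                   fmGet utm e.1, fmGet up e.1, fmGet uv e.1, fmGet uh e.1)])]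
  rw [PySem.List.foldl_append_singleton_eq_map]
  set keep0 := ui.filter (fun e => decide (ml ≤ (e.2.length : Int))) with hkeep0
  have hknd : (keep0.map Prod.fst).Nodup :=
    hnd.sublist (List.Sublist.map Prod.fst List.filter_sublist)
  rw [PySem.List.foldl_prod_mk (f := fun (d : PySem.Dict String (List String)) (e : String × List String) => d.insert e.1 (e.2))
        (g := fun (s : PySem.Dict String (List Int) × PySem.Dict String (List String) × PySem.Dict String (List String) × PySem.Dict String (List Int) × PySem.Dict String (List String) × PySem.Dict String (List Bool) × PySem.Dict String (List Int)) (e : String × List String) => (s.1.insert e.1 (fmGet ur e.1), s.2.1.insert e.1 (fmGet ut e.1), s.2.2.1.insert e.1 (fmGet urv e.1), s.2.2.2.1.insert e.1 (fmGet utm e.1), s.2.2.2.2.1.insert e.1 (fmGet up e.1), s.2.2.2.2.2.1.insert e.1 (fmGet uv e.1), s.2.2.2.2.2.2.insert e.1 (fmGet uh e.1)))]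
  rw [PySem.List.foldl_prod_mk (f := fun (d : PySem.Dict String (List Int)) (e : String × List String) => d.insert e.1 (fmGet ur e.1))
        (g := fun (s : PySem.Dict String (List String) × PySem.Dict String (List String) × PySem.Dict String (List Int) × PySem.Dict String (List String) × PySem.Dict String (List Bool) × PySem.Dict String (List Int)) (e : String × List String) => (s.1.insert e.1 (fmGet ut e.1), s.2.1.insert e.1 (fmGet urv e.1), s.2.2.1.insert e.1 (fmGet utm e.1), s.2.2.2.1.insert e.1 (fmGet up e.1), s.2.2.2.2.1.insert e.1 (fmGet uv e.1), s.2.2.2.2.2.insert e.1 (fmGet uh e.1)))]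
  rw [PySem.List.foldl_prod_mk (f := fun (d : PySem.Dict String (List String)) (e : String × List String) => d.insert e.1 (fmGet ut e.1))
        (g := fun (s : PySem.Dict String (List String) × PySem.Dict String (List Int) × PySem.Dict String (List String) × PySem.Dict String (List Bool) × PySem.Dict String (List Int)) (e : String × List String) => (s.1.insert e.1 (fmGet urv e.1), s.2.1.insert e.1 (fmGet utm e.1), s.2.2.1.insert e.1 (fmGet up e.1), s.2.2.2.1.insert e.1 (fmGet uv e.1), s.2.2.2.2.insert e.1 (fmGet uh e.1)))]
  rw [PySem.List.foldl_prod_mk (f := fun (d : PySem.Dict String (List String)) (e : String × List String) => d.insert e.1 (fmGet urv e.1))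
        (g := fun (s : PySem.Dict String (List Int) × PySem.Dict String (List String) × PySem.Dict String (List Bool) × PySem.Dict String (List Int)) (e : String × List String) => (s.1.insert e.1 (fmGet utm e.1), s.2.1.insert e.1 (fmGet up e.1), s.2.2.1.insert e.1 (fmGet uv e.1), s.2.2.2.insert e.1 (fmGet uh e.1)))]
  rw [PySem.List.foldl_prod_mk (f := fun (d : PySem.Dict String (List Int)) (e : String × List String) => d.insert e.1 (fmGet utm e.1))
        (g := fun (s : PySem.Dict String (List String) × PySem.Dict String (List Bool) × PySem.Dict String (List Int)) (e : String × List String) => (s.1.insert e.1 (fmGet up e.1), s.2.1.insert e.1 (fmGet uv e.1), s.2.2.insert e.1 (fmGet uh e.1)))]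
  rw [PySem.List.foldl_prod_mk (f := fun (d : PySem.Dict String (List String)) (e : String × List String) => d.insert e.1 (fmGet up e.1))
        (g := fun (s : PySem.Dict String (List Bool) × PySem.Dict String (List Int)) (e : String × List String) => (s.1.insert e.1 (fmGet uv e.1), s.2.insert e.1 (fmGet uh e.1)))]
  rw [PySem.List.foldl_prod_mk (f := fun (d : PySem.Dict String (List Bool)) (e : String × List String) => d.insert e.1 (fmGet uv e.1))
        (g := fun (s : PySem.Dict String (List Int)) (e : String × List String) => s.insert e.1 (fmGet uh e.1))]
  simp only [List.nil_append, List.map_map, Function.comp_def]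
  refine Prod.ext ?_ (Prod.ext ?_ (Prod.ext ?_ (Prod.ext ?_ (Prod.ext ?_ (Prod.ext ?_ (Prod.ext ?_ ?_))))))
  · rw [PySem.Dict.items_foldl_insert_fresh keep0 (fun a => a.1) (fun a => a.2) PySem.Dict.empty
        (fun a _ => PySem.Dict.contains_empty a.1) hknd]
    rw [fmDict_map_eq keep0 (fun a => a.2) (by simpa [List.map_map, Function.comp_def] using hknd)]
    simp [PySem.Dict.empty]
  · rw [PySem.Dict.items_foldl_insert_fresh keep0 (fun a => a.1) (fun a => fmGet ur a.1) PySem.Dict.empty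
        (fun a _ => PySem.Dict.contains_empty a.1) hknd]
    rw [fmDict_map_eq keep0 (fun a => fmGet ur a.1) (by simpa [List.map_map, Function.comp_def] using hknd)]
    simp [PySem.Dict.empty]
  · rw [PySem.Dict.items_foldl_insert_fresh keep0 (fun a => a.1) (fun a => fmGet ut a.1) PySem.Dict.empty
        (fun a _ => PySem.Dict.contains_empty a.1) hknd]
    rw [fmDict_map_eq keep0 (fun a => fmGet ut a.1) (by simpa [List.map_map, Function.comp_def] using hknd)]
    simp [PySem.Dict.empty]
  · rw [PySem.Dict.items_foldl_insert_fresh keep0 (fun a => a.1) (fun a => fmGet urv a.1) PySem.Dict.empty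
        (fun a _ => PySem.Dict.contains_empty a.1) hknd]
    rw [fmDict_map_eq keep0 (fun a => fmGet urv a.1) (by simpa [List.map_map, Function.comp_def] using hknd)]
    simp [PySem.Dict.empty]
  · rw [PySem.Dict.items_foldl_insert_fresh keep0 (fun a => a.1) (fun a => fmGet utm a.1) PySem.Dict.empty
        (fun a _ => PySem.Dict.contains_empty a.1) hknd]
    rw [fmDict_map_eq keep0 (fun a => fmGet utm a.1) (by simpa [List.map_map, Function.comp_def] using hknd)]
    simp [PySem.Dict.empty]
  · rw [PySem.Dict.items_foldl_insert_fresh keep0 (fun a => a.1) (fun a => fmGet up a.1) PySem.Dict.empty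
        (fun a _ => PySem.Dict.contains_empty a.1) hknd]
    rw [fmDict_map_eq keep0 (fun a => fmGet up a.1) (by simpa [List.map_map, Function.comp_def] using hknd)]
    simp [PySem.Dict.empty]
  · rw [PySem.Dict.items_foldl_insert_fresh keep0 (fun a => a.1) (fun a => fmGet uv a.1) PySem.Dict.empty
        (fun a _ => PySem.Dict.contains_empty a.1) hknd]
    rw [fmDict_map_eq keep0 (fun a => fmGet uv a.1) (by simpa [List.map_map, Function.comp_def] using hknd)]
    simp [PySem.Dict.empty]
  · rw [PySem.Dict.items_foldl_insert_fresh keep0 (fun a => a.1) (fun a => fmGet uh a.1) PySem.Dict.empty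
        (fun a _ => PySem.Dict.contains_empty a.1) hknd]
    rw [fmDict_map_eq keep0 (fun a => fmGet uh a.1) (by simpa [List.map_map, Function.comp_def] using hknd)]
    simp [PySem.Dict.empty]
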